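-- pv_equiv track=rewrite | github.com/jaybihola/PyChess | pieces.py | findValidMoves
-- ===== SOURCE A (Python) =====
-- def findValidMoves(current_position, board_size):
--     x, y = current_position
--     possible_moves = []
--
--     # Horizontal moves
--     horizontal_moves_right = [(i, y) for i in range(x + 1, board_size)]  # Moves to the right are already sorted
--     horizontal_moves_left = [(i, y) for i in range(x - 1, -1, -1)]  # Moves to the left sorted closest first
--     possible_moves.append(('horizontal right', horizontal_moves_right))
--     possible_moves.append(('horizontal left', horizontal_moves_left))
--
--     # Vertical moves
--     vertical_moves_up = [(x, i) for i in range(y - 1, -1, -1)]  # Moves up sorted closest first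
--     vertical_moves_down = [(x, i) for i in range(y + 1, board_size)]  # Moves down are already sorted
--     possible_moves.append(('vertical up', vertical_moves_up))
--     possible_moves.append(('vertical down', vertical_moves_down))
--
--     return possible_moves
-- ===== SOURCE B (Python) =====
-- def _ray(start, stop, step, make):
--     # Scan from the far end (board edge) inward toward the rook, appending,
--     # then flip once so the square nearest the rook comes first.
--     acc = []
--     for i in range(start, stop, step):
--         acc.append(make(i))
--     acc.reverse()
--     return acc
--
--
-- def findValidMoves(current_position, board_size):
--     x, y = current_position
--     return [
--         ('horizontal right', _ray(board_size - 1, x, -1, lambda i: (i, y))),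
--         ('horizontal left', _ray(0, x, 1, lambda i: (i, y))),
--         ('vertical up', _ray(0, y, 1, lambda i: (x, i))),
--         ('vertical down', _ray(board_size - 1, y, -1, lambda i: (x, i))),
--     ]
-- ===== Notes on version B (the rewrite author's own statement) =====
-- stated objective: alternative
-- what changed: B builds each ray back-to-front: a shared helper scans from the board edge inward toward the rook with an explicit accumulator, appending each square and reversing once so the closest-first order falls out, instead of A's four outward range comprehensions.
import Mathlib
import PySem

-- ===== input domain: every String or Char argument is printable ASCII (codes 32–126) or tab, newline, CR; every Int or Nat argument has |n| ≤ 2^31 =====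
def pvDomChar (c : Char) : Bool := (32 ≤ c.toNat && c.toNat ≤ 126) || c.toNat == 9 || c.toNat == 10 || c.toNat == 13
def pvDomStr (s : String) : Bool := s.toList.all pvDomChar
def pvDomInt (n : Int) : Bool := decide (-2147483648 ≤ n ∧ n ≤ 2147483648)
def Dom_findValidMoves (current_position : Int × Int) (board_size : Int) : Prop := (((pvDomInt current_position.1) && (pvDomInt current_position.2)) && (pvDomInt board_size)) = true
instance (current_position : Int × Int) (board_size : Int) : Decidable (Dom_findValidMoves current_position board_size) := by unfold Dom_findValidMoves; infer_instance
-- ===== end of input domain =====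

-- B builds each ray back-to-front: a shared helper scans from the board edge
-- inward toward the rook appending into an accumulator and flips once, instead
-- of A's four outward range comprehensions (objective: alternative decomposition, same cost).

-- ===== PORT A =====
-- Literal port of A: four coordinate-range comprehensions appended one by one.
def findValidMoves (current_position : Int × Int) (board_size : Int) : List (String × (List (Int × Int))) :=
  let x := current_position.1
  let y := current_position.2
  let possible_moves : List (String × (List (Int × Int))) := []
  -- horizontal_moves_right = [(i, y) for i in range(x + 1, board_size)]
  let horizontal_moves_right := (PySem.List.pyRange (x + 1) board_size 1).map (fun i => (i, y))
  -- horizontal_moves_left = [(i, y) for i in range(x - 1, -1, -1)]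
  let horizontal_moves_left := (PySem.List.pyRange (x - 1) (-1) (-1)).map (fun i => (i, y))
  let possible_moves := possible_moves ++ [("horizontal right", horizontal_moves_right)]
  let possible_moves := possible_moves ++ [("horizontal left", horizontal_moves_left)]
  -- vertical_moves_up = [(x, i) for i in range(y - 1, -1, -1)]
  let vertical_moves_up := (PySem.List.pyRange (y - 1) (-1) (-1)).map (fun i => (x, i))
  -- vertical_moves_down = [(x, i) for i in range(y + 1, board_size)]
  let vertical_moves_down := (PySem.List.pyRange (y + 1) board_size 1).map (fun i => (x, i))
  let possible_moves := possible_moves ++ [("vertical up", vertical_moves_up)]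
  let possible_moves := possible_moves ++ [("vertical down", vertical_moves_down)]
  possible_moves

-- ===== PORT B =====
-- Literal port of B's _ray: a for-loop over range(start, stop, step) that
-- appends make(i) to the accumulator, then reverses once.
def rayB (start stop step : Int) (make : Int → Int × Int) : List (Int × Int) :=
  ((PySem.List.pyRange start stop step).foldl (fun acc i => acc ++ [make i]) []).reverse

def findValidMoves_alt (current_position : Int × Int) (board_size : Int) : List (String × (List (Int × Int))) :=
  let x := current_position.1
  let y := current_position.2
  [("horizontal right", rayB (board_size - 1) x (-1) (fun i => (i, y))),
   ("horizontal left", rayB 0 x 1 (fun i => (i, y))),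
   ("vertical up", rayB 0 y 1 (fun i => (x, i))),
   ("vertical down", rayB (board_size - 1) y (-1) (fun i => (x, i)))]

-- ===== PRECONDITION & SPEC =====
def Spec_findValidMoves (current_position : Int × Int) (board_size : Int) (out : List (String × (List (Int × Int)))) : Prop := out = findValidMoves_alt current_position board_size
instance (current_position : Int × Int) (board_size : Int) (out : List (String × (List (Int × Int)))) : Decidable (Spec_findValidMoves current_position board_size out) := by unfold Spec_findValidMoves; infer_instance

-- ===== CLAIM =====
def Claim_equal_findValidMoves : Prop := ∀ (current_position : Int × Int) (board_size : Int), Dom_findValidMoves current_position board_size → Spec_findValidMoves current_position board_size (findValidMoves current_position board_size)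

-- ===== LEMMAS AND PROOFS =====
-- Folding an append over a list is the map.
lemma foldl_append_eq_map {α β : Type} (f : α → β) (l : List α) (acc : List β) :
    l.foldl (fun a i => a ++ [f i]) acc = acc ++ l.map f := by
  induction l generalizing acc with
  | nil => simp
  | cons h t ih => simp [List.foldl_cons, ih]

-- B's edge-inward prepending ray equals the map over the opposite-direction range.
lemma rayB_neg (s x : Int) (make : Int → Int × Int) :
    rayB s x (-1) make = (PySem.List.pyRange (x + 1) (s + 1) 1).map make := by
  rw [rayB, foldl_append_eq_map, PySem.List.pyRange_neg_one_eq_reverse]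
  simp

lemma rayB_pos (x : Int) (make : Int → Int × Int) :
    rayB 0 x 1 make = (PySem.List.pyRange (x - 1) (-1) (-1)).map make := by
  rw [rayB, foldl_append_eq_map, PySem.List.pyRange_neg_one_eq_reverse]
  simp

-- ===== VERDICT =====
theorem findValidMoves_spec : Claim_equal_findValidMoves := by
  intro cp bs _
  obtain ⟨x, y⟩ := cp
  unfold Spec_findValidMoves
  simp only [findValidMoves, findValidMoves_alt, rayB_neg, rayB_pos]
  norm_num
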